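-- pv_equiv track=rewrite | github.com/gridvisi/Python_workspace | 3 codewars/5 kyu/5 kyu Stable Weight Arrangement.py | bottom_up_seque
-- ===== SOURCE A (Python) =====
-- def bottom_up_seque(c):
--     lent = len(c)
--     table = [None] * (lent + 1)
--     table[0] = 0
--     table[1] = c[0]
--     for i in range(2, lent + 1):
--         table[i] = max(table[i - 1] + c[i - 1], c[i - 1])
--     return table
-- ===== SOURCE B (Python) =====
-- def bottom_up_seque(c):
--     prefix = [0]
--     for x in c:
--         prefix.append(prefix[-1] + x)
--     out = [0]
--     m = prefix[0]
--     for p in prefix[1:]: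
--         out.append(p - m)
--         m = min(m, p)
--     return out
-- ===== Notes on version B (the rewrite author's own statement) =====
-- stated objective: alternative
-- what changed: Replaces the max-recurrence DP (table[i] = max(table[i-1]+c[i-1], c[i-1])) with two staged passes: first build the prefix-sum list, then emit each entry as prefix[i] minus the running minimum of earlier prefix sums (the prefix-min identity for max suffix sums).
import Mathlib
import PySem

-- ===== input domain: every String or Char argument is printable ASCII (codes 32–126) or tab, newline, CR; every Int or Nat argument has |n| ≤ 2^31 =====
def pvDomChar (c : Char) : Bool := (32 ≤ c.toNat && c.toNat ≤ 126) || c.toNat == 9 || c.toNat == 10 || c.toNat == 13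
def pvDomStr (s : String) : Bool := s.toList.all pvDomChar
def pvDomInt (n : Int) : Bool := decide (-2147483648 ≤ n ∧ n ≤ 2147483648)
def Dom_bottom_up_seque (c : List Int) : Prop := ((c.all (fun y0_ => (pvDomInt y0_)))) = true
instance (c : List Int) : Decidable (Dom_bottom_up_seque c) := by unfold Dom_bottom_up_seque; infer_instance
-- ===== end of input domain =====

-- B replaces the max-recurrence DP with two staged passes — prefix sums, then prefix[i] minus a
-- running minimum of earlier prefix sums (objective: alternative); same return value on nonempty lists.

-- ===== PORT A =====
-- literal transliteration of A: preallocated table (0 stands for Python's None placeholder: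
-- outside Pre_-excluded inputs every cell read was written first), index loop over range(2, lent+1)
def bottom_up_seque (c : List Int) : List Int :=
  let lent := c.length
  let table : List Int := List.replicate (lent + 1) 0
  let table := PySem.List.pySetD table 0 0
  let table := PySem.List.pySetD table 1 (PySem.List.pyGetD c 0 0)  -- the first element; Python raises IndexError here on the empty list (excluded by Pre_)
  let table := (PySem.List.pyRange 2 ((lent : Int) + 1) 1).foldl
    (fun table i =>
      PySem.List.pySetD table i
        (max (PySem.List.pyGetD table (i - 1) 0 + PySem.List.pyGetD c (i - 1) 0)
             (PySem.List.pyGetD c (i - 1) 0))) table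
  table

-- ===== PORT B =====
-- literal transliteration of Source B: first fold builds the prefix-sum list (prefix[-1] read via
-- pyGetD; the list is never empty, it starts as [0]), second fold over prefix[1:] carries
-- (out, m) and appends p - m, updating the running minimum m (initially prefix[0]).
def bottom_up_seque_alt (c : List Int) : List Int :=
  let pre := c.foldl (fun pr x => pr ++ [PySem.List.pyGetD pr (-1) 0 + x]) [0]
  ((PySem.List.slice pre (some 1) none).foldl
      (fun (s : List Int × Int) p => (s.1 ++ [p - s.2], min s.2 p))
      ([0], PySem.List.pyGetD pre 0 0)).1

-- ===== PRECONDITION & SPEC =====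
-- Pre_ excludes the empty list, on which A raises IndexError reading the first element.
def Pre_bottom_up_seque (c : List Int) : Prop := c ≠ []
instance (c : List Int) : Decidable (Pre_bottom_up_seque c) := by unfold Pre_bottom_up_seque; infer_instance
def pvWitness_bottom_up_seque : List Int := [3, -2, 5]

def Spec_bottom_up_seque (c : List Int) (out : List Int) : Prop := out = bottom_up_seque_alt c
instance (c : List Int) (out : List Int) : Decidable (Spec_bottom_up_seque c out) := by unfold Spec_bottom_up_seque; infer_instance

-- ===== CLAIM (what is proved, stated in full; the proofs are below) =====
def Claim_equal_bottom_up_seque : Prop := ∀ (c : List Int), Dom_bottom_up_seque c → Pre_bottom_up_seque c → Spec_bottom_up_seque c (bottom_up_seque c)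

-- ===== LEMMAS AND PROOFS =====

-- the running-max scan, proof-side characterisation of A's table entries 1..n
def pvScan (acc : Int) : List Int → List Int
  | [] => []
  | x :: r => (max (acc + x) x) :: pvScan (max (acc + x) x) r

-- final accumulator of the scan
def pvAcc (acc : Int) (l : List Int) : Int := l.foldl (fun a x => max (a + x) x) acc

theorem pvScan_length (acc : Int) (l : List Int) : (pvScan acc l).length = l.length := by
  induction l generalizing acc with
  | nil => rfl
  | cons x r ih => simp [pvScan, ih]

theorem pvScan_append (acc : Int) (l : List Int) (x : Int) :
    pvScan acc (l ++ [x]) = pvScan acc l ++ [max (pvAcc acc l + x) x] := by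
  induction l generalizing acc with
  | nil => simp [pvScan, pvAcc]
  | cons y r ih => simp [pvScan, pvAcc, ih, pvAcc]

-- last entry of the scan is the final accumulator
theorem pvScan_getD_last (acc : Int) (l : List Int) (h : l ≠ []) :
    (pvScan acc l).getD (l.length - 1) 0 = pvAcc acc l := by
  induction l generalizing acc with
  | nil => exact absurd rfl h
  | cons x r ih =>
    cases r with
    | nil => simp [pvScan, pvAcc]
    | cons y s =>
      have := ih (acc := max (acc + x) x) (by simp)
      simpa [pvScan, pvAcc, List.foldl_cons] using this

-- A's table fold invariant
theorem tableA_invariant (c0 : Int) (rest : List Int) (k : Nat)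
    (hk : k ≤ rest.length) :
    (PySem.List.pyRange 2 (2 + (k : Int)) 1).foldl
      (fun table i =>
        PySem.List.pySetD table i
          (max (PySem.List.pyGetD table (i - 1) 0 + PySem.List.pyGetD (c0 :: rest) (i - 1) 0)
               (PySem.List.pyGetD (c0 :: rest) (i - 1) 0))) (0 :: c0 :: List.replicate rest.length 0)
    = (0 :: pvScan 0 ((c0 :: rest).take (k + 1))) ++ List.replicate (rest.length - k) 0 := by
  induction k with
  | zero =>
    rw [show ((2 : Int) + (0 : Nat) = 2) by norm_num, PySem.List.pyRange_one_eq_nil (by omega)]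
    simp [pvScan]
  | succ k ih =>
    have hk' : k ≤ rest.length := by omega
    have hx : k < rest.length := by omega
    rw [show ((2 : Int) + ((k + 1 : Nat) : Int) = (2 + (k : Nat)) + 1) by push_cast; ring,
        PySem.List.pyRange_one_succ_right (by omega), List.foldl_append, ih hk']
    set T := (0 :: pvScan 0 ((c0 :: rest).take (k + 1))) ++ List.replicate (rest.length - k) 0 with hT
    simp only [List.foldl_cons, List.foldl_nil]
    have hidx : (2 : Int) + (k : Nat) - 1 = ((k + 1 : Nat) : Int) := by push_cast; ring
    rw [hidx]
    -- the value read from c: c[(k+1)] = rest[k]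
    have hcv : PySem.List.pyGetD (c0 :: rest) ((k + 1 : Nat) : Int) 0 = rest.getD k 0 := by
      rw [PySem.List.pyGetD_natCast, List.getD_cons_succ]
    -- length of the scan prefix
    have hlen : (pvScan 0 ((c0 :: rest).take (k + 1))).length = k + 1 := by
      rw [pvScan_length, List.length_take]; simp; omega
    -- the value read from the table: last written cell = running accumulator
    have htv : PySem.List.pyGetD T ((k + 1 : Nat) : Int) 0 = pvAcc 0 ((c0 :: rest).take (k + 1)) := by
      rw [PySem.List.pyGetD_natCast, hT]
      have h1 : (k + 1 : Nat) < (0 :: pvScan 0 ((c0 :: rest).take (k + 1))).length := by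
        simp only [List.length_cons, hlen]; omega
      rw [List.getD_append _ _ _ _ h1]
      have h2 : ((c0 :: rest).take (k + 1)) ≠ [] := by simp
      have := pvScan_getD_last 0 ((c0 :: rest).take (k + 1)) h2
      have h3 : ((c0 :: rest).take (k + 1)).length - 1 = k := by
        rw [List.length_take]; simp; omega
      rw [h3] at this
      simpa using this
    rw [hcv, htv]
    -- the write: set at index k+2 = first cell of the zero suffix
    have hset : PySem.List.pySetD T ((2 : Int) + (k : Nat))
        (max (pvAcc 0 ((c0 :: rest).take (k + 1)) + rest.getD k 0) (rest.getD k 0))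
        = (0 :: pvScan 0 ((c0 :: rest).take (k + 1)))
          ++ (max (pvAcc 0 ((c0 :: rest).take (k + 1)) + rest.getD k 0) (rest.getD k 0))
          :: List.replicate (rest.length - (k + 1)) 0 := by
      have h0 : (0 : Int) ≤ 2 + (k : Nat) := by omega
      rw [PySem.List.pySetD_of_nonneg _ _ h0]
      have h4 : ((2 : Int) + (k : Nat)).toNat = (0 :: pvScan 0 ((c0 :: rest).take (k + 1))).length := by
        rw [List.length_cons, hlen]; omega
      rw [hT, h4, List.set_append_right _ _ (le_refl _)]
      have h5 : rest.length - k = (rest.length - (k + 1)) + 1 := by omega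
      rw [Nat.sub_self, h5, List.replicate_succ]
      rfl
    rw [hset]
    -- fold the new cell into the scan
    have h6 : (c0 :: rest).take (k + 2) = (c0 :: rest).take (k + 1) ++ [rest.getD k 0] := by
      have h7 : (k + 1) < (c0 :: rest).length := by simp; omega
      rw [show rest.getD k 0 = (c0 :: rest)[k+1] by
        simp [List.getD_eq_getElem?_getD, List.getElem?_eq_getElem hx]]
      exact List.take_succ_eq_append_getElem h7
    rw [h6, pvScan_append]
    simp

-- A equals 0 :: pvScan 0 c on nonempty input
theorem a_eq_scan (c0 : Int) (rest : List Int) :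
    bottom_up_seque (c0 :: rest) = 0 :: pvScan 0 (c0 :: rest) := by
  unfold bottom_up_seque
  simp only [List.length_cons]
  have hinit : PySem.List.pySetD (PySem.List.pySetD (List.replicate (rest.length + 1 + 1) 0) 0 0) 1
      (PySem.List.pyGetD (c0 :: rest) 0 0) = 0 :: c0 :: List.replicate rest.length 0 := by
    rw [show (List.replicate (rest.length + 1 + 1) (0:Int)) = 0 :: 0 :: List.replicate rest.length 0 by
      simp [List.replicate_succ]]
    rw [show ((0:Int)) = ((0:Nat):Int) from rfl, PySem.List.pySetD_natCast]
    rw [show ((1:Int)) = ((1:Nat):Int) from rfl, PySem.List.pySetD_natCast]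
    simp [PySem.List.pyGetD_zero_cons]
  have hrange : ((rest.length + 1 : Nat) : Int) + 1 = 2 + ((rest.length : Nat) : Int) := by
    push_cast; ring
  rw [hinit, hrange, tableA_invariant c0 rest rest.length (le_refl _)]
  simp [List.take_of_length_le]

-- ===== B-side lemmas =====

-- proof-side prefix sums (values after the seed)
def pvPfx (s : Int) : List Int → List Int
  | [] => []
  | x :: r => (s + x) :: pvPfx (s + x) r

-- proof-side running-minimum subtraction scan over the prefix-sum values
def pvMinScan (m : Int) : List Int → List Int
  | [] => []
  | p :: r => (p - m) :: pvMinScan (min m p) r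

-- B's first fold appends the prefix sums of c after any nonempty seed list
theorem pfx_foldl (c : List Int) (pr : List Int) (s : Int) (h : pr.getLast? = some s) :
    c.foldl (fun pr x => pr ++ [PySem.List.pyGetD pr (-1) 0 + x]) pr = pr ++ pvPfx s c := by
  induction c generalizing pr s with
  | nil => simp [pvPfx]
  | cons x r ih =>
    have hne : pr ≠ [] := by intro h0; rw [h0] at h; simp at h
    have hlast : PySem.List.pyGetD pr (-1) 0 = s := by
      rw [PySem.List.pyGetD, PySem.List.pyGet?_neg_one, h]; rfl
    rw [List.foldl_cons, hlast,
        ih (pr ++ [s + x]) (s + x) (by simp), pvPfx]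
    simp

-- B's second fold builds out ++ pvMinScan
theorem minscan_foldl (q : List Int) (out : List Int) (m : Int) :
    (q.foldl (fun (s : List Int × Int) p => (s.1 ++ [p - s.2], min s.2 p)) (out, m))
      = (out ++ pvMinScan m q, q.foldl min m) := by
  induction q generalizing out m with
  | nil => simp [pvMinScan]
  | cons p r ih => simp [pvMinScan, ih, List.foldl_cons]

-- the scan accumulator may be clamped at 0 without changing the output
theorem pvScan_max_zero (a : Int) (l : List Int) : pvScan (max a 0) l = pvScan a l := by
  cases l with
  | nil => rfl
  | cons x r =>
    have h : max (max a 0 + x) x = max (a + x) x := by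
      rcases le_total a 0 with h | h
      · rw [max_eq_right h]; omega
      · rw [max_eq_left h]
    show max (max a 0 + x) x :: pvScan (max (max a 0 + x) x) r
        = max (a + x) x :: pvScan (max (a + x) x) r
    rw [h]

-- the prefix-min identity: subtracting the running minimum of prefix sums = the max-recurrence scan
theorem minScan_pfx (c : List Int) (p m : Int) (h : m ≤ p) :
    pvMinScan m (pvPfx p c) = pvScan (p - m) c := by
  induction c generalizing p m with
  | nil => rfl
  | cons x r ih =>
    have hhead : p + x - m = max (p - m + x) x := by
      rcases le_total (p - m + x) x with h1 | h1 <;> omega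
    have htail : pvMinScan (min m (p + x)) (pvPfx (p + x) r)
        = pvScan (max (p - m + x) x) r := by
      rw [ih (p + x) (min m (p + x)) (min_le_right _ _)]
      have h2 : p + x - min m (p + x) = max (p + x - m) 0 := by
        rcases le_total m (p + x) with h3 | h3
        · rw [min_eq_left h3]; omega
        · rw [min_eq_right h3]; omega
      rw [h2, pvScan_max_zero]
      have h4 : max (p - m + x) x = p + x - m := by omega
      rw [h4]
    show (p + x - m) :: pvMinScan (min m (p + x)) (pvPfx (p + x) r)
        = max (p - m + x) x :: pvScan (max (p - m + x) x) r
    rw [hhead, htail]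

-- B equals 0 :: pvScan 0 c
theorem alt_eq_scan (c : List Int) : bottom_up_seque_alt c = 0 :: pvScan 0 c := by
  unfold bottom_up_seque_alt
  rw [pfx_foldl c [0] 0 (by simp)]
  simp only [List.nil_append, List.cons_append]  -- pre = 0 :: pvPfx 0 c
  rw [PySem.List.slice_from_one, List.tail_cons, PySem.List.pyGetD_zero_cons,
      minscan_foldl]
  simp [minScan_pfx c 0 0 (le_refl 0)]

-- ===== VERDICT =====
theorem bottom_up_seque_spec : Claim_equal_bottom_up_seque := by
  intro c _ hpre
  unfold Spec_bottom_up_seque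
  obtain ⟨c0, rest, rfl⟩ : ∃ c0 rest, c = c0 :: rest := by
    cases c with
    | nil => exact absurd rfl hpre
    | cons a b => exact ⟨a, b, rfl⟩
  rw [alt_eq_scan, a_eq_scan]
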